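-- pv_equiv track=rewrite | github.com/StarGazingHomies/StarGazingBot | func.py | simplify_username
-- ===== SOURCE A (Python) =====
-- def simplify_username(username):
--     """Simplifies a username since some people may mistype."""
--     result = ''
--     for c in username:
--         n = ord(c)
--         if n==124:
--             result = ''
--         if n==95 or 48 <= n <= 57 or 65 <= n <= 90 or 97 <= n <= 122:
--             result += c
--     return result
-- ===== SOURCE B (Python) =====
-- def simplify_username(username):
--     """Simplifies a username since some people may mistype."""
--     seg = username.rsplit('|', 1)[-1]
--     return ''.join(c for c in seg
--                    if c == '_' or '0' <= c <= '9' or 'A' <= c <= 'Z' or 'a' <= c <= 'z')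
-- ===== Notes on version B (the rewrite author's own statement) =====
-- stated objective: simpler
-- what changed: Replaces the stateful reset-on-pipe accumulator loop by a two-phase decomposition: take the segment after the last '|' with rsplit, then filter that segment once to ASCII [A-Za-z0-9_].
import Mathlib
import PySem

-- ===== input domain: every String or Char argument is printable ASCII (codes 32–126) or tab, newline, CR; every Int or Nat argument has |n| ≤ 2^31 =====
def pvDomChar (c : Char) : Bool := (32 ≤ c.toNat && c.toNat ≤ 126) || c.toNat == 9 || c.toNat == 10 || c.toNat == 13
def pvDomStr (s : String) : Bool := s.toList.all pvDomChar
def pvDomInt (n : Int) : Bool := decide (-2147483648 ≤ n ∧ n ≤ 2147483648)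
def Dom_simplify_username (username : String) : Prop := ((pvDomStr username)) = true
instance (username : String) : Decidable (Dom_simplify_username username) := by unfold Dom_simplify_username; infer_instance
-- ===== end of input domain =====

-- B replaces A's reset-on-pipe accumulator loop by a two-phase decomposition: segment after the last '|', then one filter (objective: simpler).

-- ===== PORT A =====
-- A's loop: result accumulator, reset to '' on '|' (ord 124), append word characters by ord ranges.
def simplify_username (username : String) : String :=
  String.ofList (username.toList.foldl
    (fun result c =>
      let n := c.toNat
      let result := if n == 124 then [] else result
      if n == 95 || (48 ≤ n && n ≤ 57) || (65 ≤ n && n ≤ 90) || (97 ≤ n && n ≤ 122) then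
        result ++ [c]
      else result)
    [])

-- ===== PORT B =====
-- c == '_' or '0' <= c <= '9' or 'A' <= c <= 'Z' or 'a' <= c <= 'z'
def pvWordChar (c : Char) : Bool :=
  c == '_' || ('0' ≤ c && c ≤ '9') || ('A' ≤ c && c ≤ 'Z') || ('a' ≤ c && c ≤ 'z')

-- username.rsplit('|', 1)[-1]: everything after the last '|' (the whole string if none)
def pvLastSeg (l : List Char) : List Char :=
  (l.reverse.takeWhile (fun c => c ≠ '|')).reverse

def simplify_username_alt (username : String) : String :=
  String.ofList ((pvLastSeg username.toList).filter pvWordChar)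

-- ===== PRECONDITION & SPEC =====
def Spec_simplify_username (username : String) (out : String) : Prop := out = simplify_username_alt username
instance (username : String) (out : String) : Decidable (Spec_simplify_username username out) := by unfold Spec_simplify_username; infer_instance

-- ===== CLAIM (what is proved, stated in full; the proofs are below) =====
def Claim_equal_simplify_username : Prop := ∀ (username : String), Dom_simplify_username username → Spec_simplify_username username (simplify_username username)

-- ===== LEMMAS AND PROOFS =====

theorem pv_char_le_iff (d c : Char) : (d ≤ c) ↔ (d.toNat ≤ c.toNat) := by
  unfold Char.toNat; rw [Char.le_def, UInt32.le_iff_toNat_le]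

theorem pv_char_eq_iff (c d : Char) : (c = d) ↔ (c.toNat = d.toNat) := by
  constructor
  · intro h; rw [h]
  · intro h; exact Char.ext (UInt32.toNat_inj.mp h)

-- A's per-character arithmetic test equals B's character class.
theorem pv_ok_eq (c : Char) :
    (c.toNat == 95 || (48 ≤ c.toNat && c.toNat ≤ 57) || (65 ≤ c.toNat && c.toNat ≤ 90)
      || (97 ≤ c.toNat && c.toNat ≤ 122)) = pvWordChar c := by
  simp only [pvWordChar]
  rw [Bool.eq_iff_iff]
  simp only [Bool.or_eq_true, Bool.and_eq_true, beq_iff_eq, decide_eq_true_eq,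
    pv_char_le_iff, pv_char_eq_iff]
  rw [show ('_').toNat = 95 from rfl, show ('0').toNat = 48 from rfl,
    show ('9').toNat = 57 from rfl, show ('A').toNat = 65 from rfl,
    show ('Z').toNat = 90 from rfl, show ('a').toNat = 97 from rfl,
    show ('z').toNat = 122 from rfl]

theorem pv_takeWhile_append_stop {α : Type} (p : α → Bool) (m t : List α)
    (h : ∃ x ∈ m, ¬ p x) : (m ++ t).takeWhile p = m.takeWhile p := by
  induction m with
  | nil => simp at h
  | cons a m ih =>
    by_cases hp : p a
    · simp only [List.cons_append, List.takeWhile_cons, hp, if_pos]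
      rcases h with ⟨x, hx, hpx⟩
      rcases List.mem_cons.mp hx with h1 | h1
      · subst h1; simp [hp] at hpx
      · rw [ih ⟨x, h1, hpx⟩]
    · simp [List.takeWhile_cons, hp]

theorem pv_takeWhile_append_all {α : Type} (p : α → Bool) (m t : List α)
    (h : ∀ x ∈ m, p x) : (m ++ t).takeWhile p = m ++ t.takeWhile p := by
  induction m with
  | nil => simp
  | cons a m ih =>
    have ha : p a := h a (List.mem_cons_self ..)
    simp only [List.cons_append, List.takeWhile_cons, ha, if_pos]
    rw [ih (fun x hx => h x (List.mem_cons_of_mem _ hx))]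

theorem pv_lastSeg_no_pipe (l : List Char) (h : '|' ∉ l) : pvLastSeg l = l := by
  unfold pvLastSeg
  rw [List.takeWhile_eq_self_iff.mpr, List.reverse_reverse]
  intro c hc
  simp only [ne_eq, decide_eq_true_eq]
  intro he; subst he; exact h (List.mem_reverse.mp hc)

theorem pv_lastSeg_cons_mem (c : Char) (l : List Char) (h : '|' ∈ l) :
    pvLastSeg (c :: l) = pvLastSeg l := by
  unfold pvLastSeg
  rw [show (c :: l).reverse = l.reverse ++ [c] from by simp,
      pv_takeWhile_append_stop _ _ _ ⟨'|', List.mem_reverse.mpr h, by simp⟩]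

theorem pv_lastSeg_pipe_cons (l : List Char) (h : '|' ∉ l) :
    pvLastSeg ('|' :: l) = l := by
  unfold pvLastSeg
  rw [show ('|' :: l).reverse = l.reverse ++ ['|'] from by simp,
      pv_takeWhile_append_all _ _ _
        (fun x hx => by
          simp only [ne_eq, decide_eq_true_eq]
          intro he; subst he; exact h (List.mem_reverse.mp hx))]
  simp

-- Invariant of A's fold: reset-on-pipe ≡ filter of the segment after the last pipe.
theorem pv_fold_inv (l : List Char) (r : List Char) :
    l.foldl
      (fun result c =>
        let n := c.toNat
        let result := if n == 124 then [] else result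
        if n == 95 || (48 ≤ n && n ≤ 57) || (65 ≤ n && n ≤ 90) || (97 ≤ n && n ≤ 122) then
          result ++ [c]
        else result)
      r
    = if '|' ∈ l then (pvLastSeg l).filter pvWordChar else r ++ l.filter pvWordChar := by
  induction l generalizing r with
  | nil => simp
  | cons c l ih =>
    rw [List.foldl_cons, ih]
    by_cases hc : c = '|'
    · subst hc
      have hnp : pvWordChar '|' = false := rfl
      by_cases hl : '|' ∈ l
      · simp only [List.mem_cons, hl, or_true, if_pos,
          pv_lastSeg_cons_mem _ _ hl]
      · have hseg : pvLastSeg ('|' :: l) = l := pv_lastSeg_pipe_cons l hl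
        simp only [List.mem_cons, hl, or_false, hseg]
        rw [show ('|').toNat = 124 from rfl]
        norm_num
    · have hcn : (c.toNat == 124) = false := by
        simp only [beq_eq_false_iff_ne, ne_eq]
        intro h
        exact hc ((pv_char_eq_iff c '|').mpr (by rw [h]; rfl))
      by_cases hl : '|' ∈ l
      · have hmem : '|' ∈ c :: l := List.mem_cons_of_mem _ hl
        simp only [hmem, if_pos, hl, if_pos, pv_lastSeg_cons_mem _ _ hl, hcn,
          Bool.false_eq_true, if_false, pv_ok_eq c]
      · have hmem : '|' ∉ c :: l := by
          simp only [List.mem_cons, not_or]; exact ⟨fun h => hc h.symm, hl⟩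
        simp only [hmem, if_neg, hl, Bool.false_eq_true, hcn,
          List.filter_cons, pv_ok_eq c, not_false_eq_true]
        by_cases hw : pvWordChar c <;> simp [hw]

-- ===== VERDICT (by name: the statement is the Claim_ definition above) =====
theorem simplify_username_spec : Claim_equal_simplify_username := by
  intro username _
  show simplify_username username = simplify_username_alt username
  unfold simplify_username simplify_username_alt
  rw [pv_fold_inv]
  by_cases h : '|' ∈ username.toList
  · simp [h]
  · simp [h, pv_lastSeg_no_pipe _ h]
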